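-- pv_equiv track=rewrite | github.com/emilysanchezz/IML-Wythoff-Array-SP2026 | code_FA25/matrix.py | constant_anti_diagonals
-- ===== SOURCE A (Python) =====
-- def constant_anti_diagonals(M):
--
--     n = len(M)
--     result = []
--
--
--     for s in range(2 * n - 1):
--         vals = []
--         for i in range(n):
--             j = s - i
--             if 0 <= j < n:
--                 vals.append(M[i][j])
--
--         if len(vals) >= 1 and all(v == vals[0] for v in vals):
--             result.append(s + 1)
--
--     return result
-- ===== SOURCE B (Python) =====
-- def constant_anti_diagonals(M):
--     n = len(M)
--     d = {}
--     for i in range(n):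
--         for j in range(n):
--             v = M[i][j]
--             s = i + j
--             if s not in d:
--                 d[s] = (v, True)
--             else:
--                 f, c = d[s]
--                 d[s] = (f, c and v == f)
--     result = []
--     for s in range(2 * n - 1):
--         if s in d and d[s][1]:
--             result.append(s + 1)
--     return result
-- ===== Notes on version B (the rewrite author's own statement) =====
-- stated objective: alternative
-- what changed: A rescans every row once per anti-diagonal (2n-1 diagonals x n rows, building each diagonal's value list and re-checking it); B makes a single row-major pass over the cells, maintaining per diagonal s=i+j a dict entry (first value, still-constant flag), then emits s+1 for flagged diagonals in increasing s.
import Mathlib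
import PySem

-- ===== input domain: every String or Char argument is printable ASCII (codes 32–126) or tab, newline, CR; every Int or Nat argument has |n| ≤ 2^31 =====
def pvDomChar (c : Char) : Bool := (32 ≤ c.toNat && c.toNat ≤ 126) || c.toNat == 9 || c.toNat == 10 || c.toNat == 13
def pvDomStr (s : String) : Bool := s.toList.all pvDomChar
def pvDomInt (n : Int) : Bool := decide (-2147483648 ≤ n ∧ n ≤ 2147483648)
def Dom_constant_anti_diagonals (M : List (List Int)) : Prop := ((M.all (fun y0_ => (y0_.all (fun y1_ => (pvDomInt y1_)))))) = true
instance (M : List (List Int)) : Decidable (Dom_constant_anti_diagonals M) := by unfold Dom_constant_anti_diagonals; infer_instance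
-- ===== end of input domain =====

-- B replaces A's per-diagonal rescan of all rows (2n-1 diagonals × n rows each) by ONE pass over the
-- cells maintaining, per diagonal index s = i + j, a dict entry (first value, still-constant flag),
-- then reads the flags off in increasing s.

-- ===== PORT A =====
def constant_anti_diagonals (M : List (List Int)) : List Int :=
  let n : Int := M.length
  (PySem.List.pyRange 0 (2 * n - 1) 1).foldl (fun result s =>
    let vals := (PySem.List.pyRange 0 n 1).foldl (fun vals i =>
      let j := s - i
      if 0 ≤ j ∧ j < n then vals ++ [PySem.List.pyGetD (PySem.List.pyGetD M i ([] : List Int)) j 0]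
      else vals) []
    if 1 ≤ vals.length ∧ vals.all (fun v => v == vals.getD 0 0) then result ++ [s + 1]
    else result) []

-- ===== PORT B =====
def constant_anti_diagonals_alt (M : List (List Int)) : List Int :=
  let n : Int := M.length
  let d : PySem.Dict Int (Int × Bool) :=
    (PySem.List.pyRange 0 n 1).foldl (fun d i =>
      (PySem.List.pyRange 0 n 1).foldl (fun d j =>
        let v := PySem.List.pyGetD (PySem.List.pyGetD M i ([] : List Int)) j 0
        match d.get? (i + j) with
        | none => d.insert (i + j) (v, true)
        | some (f, c) => d.insert (i + j) (f, c && (v == f))) d) PySem.Dict.empty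
  (PySem.List.pyRange 0 (2 * n - 1) 1).foldl (fun result s =>
    match d.get? s with
    | some (_, true) => result ++ [s + 1]
    | _ => result) []

-- ===== PRECONDITION & SPEC =====
-- A reads M[i][j] for every 0 ≤ i, j < len(M); it raises IndexError iff some row is shorter than
-- len(M), so exactly those ragged inputs are excluded.
def Pre_constant_anti_diagonals (M : List (List Int)) : Prop := ∀ r ∈ M, M.length ≤ r.length
instance (M : List (List Int)) : Decidable (Pre_constant_anti_diagonals M) := by
  unfold Pre_constant_anti_diagonals; infer_instance

def pvWitness_constant_anti_diagonals : List (List Int) := [[1, 2], [3, 2]]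

def Spec_constant_anti_diagonals (M : List (List Int)) (out : List Int) : Prop := out = constant_anti_diagonals_alt M
instance (M : List (List Int)) (out : List Int) : Decidable (Spec_constant_anti_diagonals M out) := by unfold Spec_constant_anti_diagonals; infer_instance

-- ===== CLAIM (what is proved, stated in full; the proofs are below) =====
def Claim_equal_constant_anti_diagonals : Prop := ∀ (M : List (List Int)), Dom_constant_anti_diagonals M → Pre_constant_anti_diagonals M → Spec_constant_anti_diagonals M (constant_anti_diagonals M)

-- ===== LEMMAS AND PROOFS =====

-- the cell value M[i][j] as both ports read it
def pvVal (M : List (List Int)) (i j : Int) : Int :=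
  PySem.List.pyGetD (PySem.List.pyGetD M i ([] : List Int)) j 0

-- how one more value on a diagonal updates B's (first, still-constant) summary
def pvUpd (o : Option (Int × Bool)) (v : Int) : Option (Int × Bool) :=
  match o with
  | none => some (v, true)
  | some (f, c) => some (f, c && (v == f))

-- B's per-cell step
def pvStep (M : List (List Int)) (d : PySem.Dict Int (Int × Bool)) (c : Int × Int) : PySem.Dict Int (Int × Bool) :=
  match d.get? (c.1 + c.2) with
  | none => d.insert (c.1 + c.2) (pvVal M c.1 c.2, true)
  | some (f, cn) => d.insert (c.1 + c.2) (f, cn && (pvVal M c.1 c.2 == f))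

-- B's dict, as a fold of pvStep over the row-major cell list
def pvDictB (M : List (List Int)) : PySem.Dict Int (Int × Bool) :=
  (PySem.List.pyRange 0 (M.length : Int) 1).foldl (fun d i =>
    (PySem.List.pyRange 0 (M.length : Int) 1).foldl (fun d j => pvStep M d (i, j)) d) PySem.Dict.empty

-- A's inner loop: the values on diagonal s in row order
def pvValsA (M : List (List Int)) (s : Int) : List Int :=
  (PySem.List.pyRange 0 (M.length : Int) 1).foldl (fun vals i =>
    if 0 ≤ s - i ∧ s - i < (M.length : Int) then vals ++ [pvVal M i (s - i)] else vals) []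

lemma get?_pvStep (M : List (List Int)) (d : PySem.Dict Int (Int × Bool)) (c : Int × Int) (s : Int) :
    (pvStep M d c).get? s =
      if s = c.1 + c.2 then pvUpd (d.get? (c.1 + c.2)) (pvVal M c.1 c.2) else d.get? s := by
  by_cases hs : s = c.1 + c.2
  · rw [if_pos hs, hs]
    unfold pvStep pvUpd
    rcases h : d.get? (c.1 + c.2) with _ | ⟨f, cn⟩ <;> simp [PySem.Dict.get?_insert_self]
  · rw [if_neg hs]
    unfold pvStep
    rcases h : d.get? (c.1 + c.2) with _ | ⟨f, cn⟩ <;>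
      simp [PySem.Dict.get?_insert_of_ne _ _ hs]

-- dict invariant: a lookup after folding a cell list is the pvUpd-fold of that diagonal's values
lemma get?_foldl_pvStep (M : List (List Int)) (L : List (Int × Int))
    (d : PySem.Dict Int (Int × Bool)) (s : Int) :
    (L.foldl (pvStep M) d).get? s =
      ((L.filter (fun c => c.1 + c.2 == s)).map (fun c => pvVal M c.1 c.2)).foldl pvUpd (d.get? s) := by
  induction L generalizing d with
  | nil => rfl
  | cons c L ih =>
    simp only [List.foldl_cons, List.filter_cons]
    by_cases hc : c.1 + c.2 = s
    · rw [if_pos (by simpa using hc), List.map_cons, List.foldl_cons, ih, get?_pvStep,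
        if_pos hc.symm, hc]
    · rw [if_neg (by simpa using hc), ih, get?_pvStep, if_neg (fun h => hc h.symm)]

lemma foldl_pvUpd_some (vs : List Int) (f : Int) (c : Bool) :
    vs.foldl pvUpd (some (f, c)) = some (f, c && vs.all (fun v => v == f)) := by
  induction vs generalizing c with
  | nil => cases c <;> rfl
  | cons v vs ih => simp only [List.foldl_cons, pvUpd, ih, List.all_cons, Bool.and_assoc]

lemma foldl_pvUpd_none (vs : List Int) :
    vs.foldl pvUpd none =
      match vs with
      | [] => none
      | v :: r => some (v, r.all (fun x => x == v)) := by
  cases vs with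
  | nil => rfl
  | cons v r =>
    show (r.foldl pvUpd (pvUpd none v)) = _
    rw [show pvUpd none v = some (v, true) from rfl, foldl_pvUpd_some]
    simp

lemma filter_map_eq_flatMap {α β : Type} (l : List α) (p : α → Bool) (f : α → β) :
    (l.filter p).map f = l.flatMap (fun i => if p i then [f i] else []) := by
  induction l with
  | nil => rfl
  | cons x l ih => by_cases h : p x <;> simp [h, ih]

lemma foldl_append_if_prop {α β : Type} (P : α → Prop) [DecidablePred P] (f : α → β)
    (l : List α) (acc : List β) :
    l.foldl (fun acc x => if P x then acc ++ [f x] else acc) acc =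
      acc ++ (l.filter (fun x => decide (P x))).map f := by
  induction l generalizing acc with
  | nil => simp
  | cons x l ih => by_cases h : P x <;> simp [h, ih]

lemma filter_pyRange_aux (k : Nat) : ∀ (a b i s : Int), (b - a).toNat ≤ k →
    (PySem.List.pyRange a b 1).filter (fun j => i + j == s) =
      if a ≤ s - i ∧ s - i < b then [s - i] else [] := by
  induction k with
  | zero =>
    intro a b i s hk
    have hab : b ≤ a := by omega
    rw [PySem.List.pyRange_one_eq_nil hab, List.filter_nil, if_neg (by omega)]
  | succ k ih =>
    intro a b i s hk
    by_cases hab : b ≤ a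
    · rw [PySem.List.pyRange_one_eq_nil hab, List.filter_nil, if_neg (by omega)]
    · have hab' : a < b := by omega
      rw [PySem.List.pyRange_one_cons hab', List.filter_cons]
      by_cases ha : i + a = s
      · rw [if_pos (by simpa using ha)]
        have hnone : (PySem.List.pyRange (a + 1) b 1).filter (fun j => i + j == s) = [] := by
          rw [ih (a + 1) b i s (by omega), if_neg (by omega)]
        rw [hnone, if_pos ⟨by omega, by omega⟩]
        have h1 : a = s - i := by omega
        rw [h1]
      · rw [if_neg (by simpa using ha), ih (a + 1) b i s (by omega)]
        have hiff : (a + 1 ≤ s - i ∧ s - i < b) ↔ (a ≤ s - i ∧ s - i < b) := by omega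
        simp only [hiff]

lemma filter_pyRange_eq (a b i s : Int) :
    (PySem.List.pyRange a b 1).filter (fun j => i + j == s) =
      if a ≤ s - i ∧ s - i < b then [s - i] else [] :=
  filter_pyRange_aux (b - a).toNat a b i s le_rfl

-- both programs see the same value list per diagonal
lemma get?_pvDictB (M : List (List Int)) (s : Int) :
    (pvDictB M).get? s = (pvValsA M s).foldl pvUpd none := by
  have hP : pvDictB M =
      (((PySem.List.pyRange 0 (M.length : Int) 1).flatMap
        (fun i => (PySem.List.pyRange 0 (M.length : Int) 1).map (fun j => (i, j)))).foldl
        (pvStep M) PySem.Dict.empty) := by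
    rw [List.foldl_flatMap]
    simp only [List.foldl_map]
    rfl
  have he : (PySem.Dict.empty : PySem.Dict Int (Int × Bool)).get? s = none := by simp
  rw [hP, get?_foldl_pvStep, he]
  have hvals : pvValsA M s =
      ((PySem.List.pyRange 0 (M.length : Int) 1).flatMap
        (fun i => if 0 ≤ s - i ∧ s - i < (M.length : Int) then [pvVal M i (s - i)] else [])) := by
    unfold pvValsA
    rw [foldl_append_if_prop, filter_map_eq_flatMap]
    simp
  rw [hvals, List.filter_flatMap, List.map_flatMap]
  congr 1
  have hfun : (fun i => ((PySem.List.pyRange 0 (M.length : Int) 1).map (fun j => (i, j))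
        |>.filter (fun c => c.1 + c.2 == s)).map (fun c => pvVal M c.1 c.2)) =
      (fun i => if 0 ≤ s - i ∧ s - i < (M.length : Int) then [pvVal M i (s - i)] else []) := by
    funext i
    rw [List.filter_map]
    have hc : ((fun c : Int × Int => c.1 + c.2 == s) ∘ (fun j => (i, j))) = (fun j => i + j == s) := by
      funext j; rfl
    rw [hc, filter_pyRange_eq 0 (M.length : Int) i s]
    split_ifs with h
    · rfl
    · rfl
  rw [hfun]

-- the two loop bodies agree at every diagonal index s
lemma pvPoint (M : List (List Int)) (result : List Int) (s : Int) :
    (if 1 ≤ (pvValsA M s).length ∧ (pvValsA M s).all (fun v => v == (pvValsA M s).getD 0 0)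
     then result ++ [s + 1] else result) =
      (match (pvDictB M).get? s with
       | some (_, true) => result ++ [s + 1]
       | _ => result) := by
  rw [get?_pvDictB, foldl_pvUpd_none]
  cases hv : pvValsA M s with
  | nil => simp
  | cons v r =>
    by_cases hr : r.all (fun x => x == v) = true
    · simp [hr]
    · simp only [Bool.not_eq_true] at hr
      simp [hr]

lemma pvA_eq (M : List (List Int)) :
    constant_anti_diagonals M =
      (PySem.List.pyRange 0 (2 * (M.length : Int) - 1) 1).foldl (fun result s =>
        if 1 ≤ (pvValsA M s).length ∧ (pvValsA M s).all (fun v => v == (pvValsA M s).getD 0 0)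
        then result ++ [s + 1] else result) [] := rfl

lemma pvB_eq (M : List (List Int)) :
    constant_anti_diagonals_alt M =
      (PySem.List.pyRange 0 (2 * (M.length : Int) - 1) 1).foldl (fun result s =>
        match (pvDictB M).get? s with
        | some (_, true) => result ++ [s + 1]
        | _ => result) [] := rfl

-- ===== VERDICT (by name: the statement is the Claim_ definition above) =====
theorem constant_anti_diagonals_spec : Claim_equal_constant_anti_diagonals := by
  intro M _ _
  show constant_anti_diagonals M = constant_anti_diagonals_alt M
  rw [pvA_eq, pvB_eq]
  exact List.foldl_ext _ _ [] (fun result s _ => pvPoint M result s)
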